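-- pv_equiv track=rewrite | github.com/mtoles/BeNYfits-ProADA | q2.py | max_rect_area
-- ===== SOURCE A (Python) =====
-- def max_rect_area(arr):
--     MOD = 10**9 + 7
--     # Sort the array in descending order
--     arr.sort(reverse=True)
--
--     n = len(arr)
--     pairs = []
--
--     i = 0
--     while i < n - 1:
--         if arr[i] == arr[i + 1]:  # if both sticks are the same
--             pairs.append(arr[i])
--             i += 2  # Skip the next one, since we used both sticks
--         elif arr[i] - 1 == arr[i + 1]:  # if one stick can be reduced by 1 unit
--             pairs.append(arr[i + 1])
--             i += 2  # Skip the next one, since we used both sticks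
--         else:
--             i += 1  # Move to the next stick length
--
--     # Now form rectangles by using two pairs at a time
--     area_sum = 0
--     for j in range(0, len(pairs) - 1, 2):
--         area_sum += pairs[j] * pairs[j + 1]
--         area_sum %= MOD  # Take mod at each step to avoid overflow
--
--     return area_sum
-- ===== SOURCE B (Python) =====
-- def max_rect_area(arr):
--     # Counting approach: bucket stick lengths in a dict, then walk the distinct
--     # lengths in descending order, pairing within a bucket and borrowing one
--     # stick of length v-1 for an odd leftover; areas accumulate via a pending side.
--     MOD = 10**9 + 7
--     arr.sort(reverse=True)  # keep A's in-place mutation of the argument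
--     cnt = {}
--     for x in arr:
--         cnt[x] = cnt.get(x, 0) + 1
--     total = 0
--     pending = None
--     for v in sorted(cnt, reverse=True):
--         m = cnt[v]
--         for _ in range(m // 2):
--             if pending is None:
--                 pending = v
--             else:
--                 total = (total + pending * v) % MOD
--                 pending = None
--         if m % 2 == 1 and cnt.get(v - 1, 0) > 0:
--             cnt[v - 1] -= 1
--             if pending is None:
--                 pending = v - 1
--             else:
--                 total = (total + pending * (v - 1)) % MOD
--                 pending = None
--     return total
-- ===== Notes on version B (the rewrite author's own statement) =====
-- stated objective: alternative
-- what changed: A scans the sorted array with an adjacent-pair two-pointer walk collecting a pairs list and then multiplies consecutive pairs in a second step-2 loop; B instead buckets stick lengths into a count dictionary and walks the distinct lengths in descending order, taking count//2 pairs per bucket and borrowing one stick from bucket v-1 for an odd leftover, accumulating areas with a pending-side variable.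
import Mathlib
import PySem

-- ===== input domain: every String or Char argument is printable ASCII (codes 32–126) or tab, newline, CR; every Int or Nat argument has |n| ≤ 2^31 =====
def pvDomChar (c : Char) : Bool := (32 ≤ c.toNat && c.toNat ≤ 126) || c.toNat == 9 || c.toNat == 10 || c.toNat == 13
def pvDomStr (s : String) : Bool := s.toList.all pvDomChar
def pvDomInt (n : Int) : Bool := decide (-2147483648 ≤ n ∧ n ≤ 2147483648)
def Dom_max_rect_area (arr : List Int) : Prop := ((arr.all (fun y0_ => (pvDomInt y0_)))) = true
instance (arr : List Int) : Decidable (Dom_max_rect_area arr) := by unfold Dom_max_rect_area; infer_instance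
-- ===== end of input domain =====

-- B replaces A's adjacent-pair scan of the sorted array (pairs list + second step-2 loop)
-- by a count dictionary walked over the distinct lengths in descending order (alternative).
-- Both Pythons sort `arr` in place (same mutation); the theorems are about the return value.

-- ===== PORT A =====
-- while loop over the descending-sorted array, collecting pair sides
def pvPairsA : List Int → List Int
  | x :: y :: rest =>
    if x = y then x :: pvPairsA rest
    else if x - 1 = y then y :: pvPairsA rest
    else pvPairsA (y :: rest)
  | _ => []

-- for j in range(0, len(pairs)-1, 2): consumes two sides at a time
def pvAreaA : List Int → Int → Int
  | p :: q :: rest, acc => pvAreaA rest (PySem.Int.mod (acc + p * q) (10 ^ 9 + 7))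
  | _, acc => acc

def max_rect_area (arr : List Int) : Int :=
  pvAreaA (pvPairsA (PySem.List.sorted arr (fun x => x) true)) 0

-- ===== PORT B =====
-- the repeated inline `if pending is None … else …` block of Source B
def pvEmit (side : Int) : Option Int × Int → Option Int × Int
  | (none, total) => (some side, total)
  | (some p, total) => (none, PySem.Int.mod (total + p * side) (10 ^ 9 + 7))

-- for _ in range(k): emit v
def pvEmitN : Nat → Int → Option Int × Int → Option Int × Int
  | 0, _, st => st
  | n + 1, v, st => pvEmitN n v (pvEmit v st)

-- for v in sorted(cnt, reverse=True): …
def pvLoopB : List Int → PySem.Dict Int Int → Option Int × Int → Int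
  | [], _, st => st.2
  | v :: ks, cnt, st =>
    let m := cnt.getD v 0
    let st1 := pvEmitN (PySem.Int.floordiv m 2).toNat v st
    if PySem.Int.mod m 2 = 1 ∧ 0 < cnt.getD (v - 1) 0 then
      pvLoopB ks (cnt.insert (v - 1) (cnt.getD (v - 1) 0 - 1)) (pvEmit (v - 1) st1)
    else
      pvLoopB ks cnt st1

def max_rect_area_alt (arr : List Int) : Int :=
  let s := PySem.List.sorted arr (fun x => x) true
  let cnt := s.foldl (fun d x => d.insert x (d.getD x 0 + 1)) PySem.Dict.empty
  pvLoopB (PySem.List.sorted cnt.keys (fun x => x) true) cnt (none, 0)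

-- ===== PRECONDITION & SPEC =====
def Spec_max_rect_area (arr : List Int) (out : Int) : Prop := out = max_rect_area_alt arr
instance (arr : List Int) (out : Int) : Decidable (Spec_max_rect_area arr out) := by unfold Spec_max_rect_area; infer_instance

-- ===== CLAIM (what is proved, stated in full; the proofs are below) =====
def Claim_equal_max_rect_area : Prop := ∀ (arr : List Int), Dom_max_rect_area arr → Spec_max_rect_area arr (max_rect_area arr)

-- ===== LEMMAS AND PROOFS =====

-- strictly-descending-values relation on runs
def pvLt (p q : Int × Nat) : Prop := q.1 < p.1

-- pending side as a (≤1-element) prefix of a pairs list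
def pvPend : Option Int → List Int
  | none => []
  | some p => [p]

-- run-length encoding of the descending-sorted array, and its expansion
def pvRleCons (x : Int) : List (Int × Nat) → List (Int × Nat)
  | [] => [(x, 1)]
  | (v, m) :: rest => if x = v then (x, m + 1) :: rest else (x, 1) :: (v, m) :: rest

def pvRle : List Int → List (Int × Nat)
  | [] => []
  | x :: xs => pvRleCons x (pvRle xs)

def pvExpand (e : List (Int × Nat)) : List Int := e.flatMap (fun p => List.replicate p.2 p.1)

-- greedy pairing over a nonempty run-length encoding, head run split off
def pvGreedyGo : Int → Nat → List (Int × Nat) → List Int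
  | v, m, [] => List.replicate (m / 2) v
  | v, m, (w, k) :: rest' =>
    List.replicate (m / 2) v ++
      (if m % 2 = 1 then
        (if w = v - 1 ∧ 0 < k then (v - 1) :: pvGreedyGo w (k - 1) rest'
         else pvGreedyGo w k rest')
      else pvGreedyGo w k rest')

-- association-list lookup of a count in the encoding
def pvLookup : List (Int × Nat) → Int → Int
  | [], _ => 0
  | (v, m) :: rest, w => if w = v then (m : Int) else pvLookup rest w

-- the sides emitted by B's loop, as a list
def pvSidesB : List Int → PySem.Dict Int Int → List Int
  | [], _ => []
  | v :: ks, cnt =>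
    if PySem.Int.mod (cnt.getD v 0) 2 = 1 ∧ 0 < cnt.getD (v - 1) 0 then
      List.replicate (PySem.Int.floordiv (cnt.getD v 0) 2).toNat v ++
        (v - 1) :: pvSidesB ks (cnt.insert (v - 1) (cnt.getD (v - 1) 0 - 1))
    else
      List.replicate (PySem.Int.floordiv (cnt.getD v 0) 2).toNat v ++ pvSidesB ks cnt

theorem pvEmit_fuse (v : Int) (sides : List Int) (st : Option Int × Int) :
    pvAreaA (pvPend (pvEmit v st).1 ++ sides) (pvEmit v st).2
      = pvAreaA (pvPend st.1 ++ v :: sides) st.2 := by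
  obtain ⟨p, t⟩ := st
  cases p <;> rfl

theorem pvEmitN_fuse (n : Nat) (v : Int) (sides : List Int) : ∀ (st : Option Int × Int),
    pvAreaA (pvPend (pvEmitN n v st).1 ++ sides) (pvEmitN n v st).2
      = pvAreaA (pvPend st.1 ++ (List.replicate n v ++ sides)) st.2 := by
  induction n with
  | zero => intro st; rfl
  | succ n ih =>
    intro st
    rw [pvEmitN, ih, pvEmit_fuse]
    rfl

theorem pvLoopB_eq_area (ks : List Int) : ∀ (cnt : PySem.Dict Int Int) (st : Option Int × Int),
    pvLoopB ks cnt st = pvAreaA (pvPend st.1 ++ pvSidesB ks cnt) st.2 := by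
  induction ks with
  | nil =>
    intro cnt st
    obtain ⟨p, t⟩ := st
    cases p <;> rfl
  | cons v ks ih =>
    intro cnt st
    rw [show pvLoopB (v :: ks) cnt st =
        (if PySem.Int.mod (cnt.getD v 0) 2 = 1 ∧ 0 < cnt.getD (v - 1) 0 then
          pvLoopB ks (cnt.insert (v - 1) (cnt.getD (v - 1) 0 - 1))
            (pvEmit (v - 1) (pvEmitN (PySem.Int.floordiv (cnt.getD v 0) 2).toNat v st))
        else pvLoopB ks cnt (pvEmitN (PySem.Int.floordiv (cnt.getD v 0) 2).toNat v st)) from rfl,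
      pvSidesB]
    by_cases hg : PySem.Int.mod (cnt.getD v 0) 2 = 1 ∧ 0 < cnt.getD (v - 1) 0
    · rw [if_pos hg, if_pos hg, ih, pvEmit_fuse, pvEmitN_fuse]
    · rw [if_neg hg, if_neg hg, ih, pvEmitN_fuse]

theorem pvPairsA_pair (v : Int) (t : List Int) : pvPairsA (v :: v :: t) = v :: pvPairsA t := by
  simp [pvPairsA]

-- splitting off the pairs inside one run
theorem pvPairsA_replicate (m : Nat) (v : Int) (t : List Int) :
    pvPairsA (List.replicate m v ++ t)
      = List.replicate (m / 2) v ++ pvPairsA (List.replicate (m % 2) v ++ t) := by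
  induction m using Nat.twoStepInduction with
  | zero => rfl
  | one => rfl
  | more m ih _ =>
    have h2 : List.replicate (m + 2) v ++ t = v :: v :: (List.replicate m v ++ t) := by
      simp [List.replicate_succ]
    rw [h2, pvPairsA_pair, ih]
    have h3 : (m + 2) / 2 = m / 2 + 1 := by omega
    have h4 : (m + 2) % 2 = m % 2 := by omega
    rw [h3, h4, List.replicate_succ]
    rfl

-- the chain relation only reads values, never counts
theorem pvChainCount (w : Int) (k k' : Nat) (r : List (Int × Nat))
    (h : List.IsChain pvLt ((w, k) :: r)) : List.IsChain pvLt ((w, k') :: r) := by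
  cases r with
  | nil => exact List.isChain_singleton _
  | cons b r' =>
    rw [List.isChain_cons_cons] at h ⊢
    exact h

theorem pvLookup_eq_zero (e : List (Int × Nat)) (w : Int) (h : ∀ p ∈ e, p.1 ≠ w) :
    pvLookup e w = 0 := by
  induction e with
  | nil => rfl
  | cons p rest ih =>
    obtain ⟨v, m⟩ := p
    rw [pvLookup, if_neg, ih]
    · intro q hq; exact h q (List.mem_cons_of_mem _ hq)
    · exact fun hh => h (v, m) List.mem_cons_self (hh ▸ rfl)

-- A's scan over the expansion of a strictly-descending encoding is the run-level greedy
theorem pvPairsA_go : ∀ (v : Int) (m : Nat) (rest : List (Int × Nat)),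
    List.IsChain pvLt ((v, m) :: rest) →
    (∀ p ∈ rest, 0 < p.2) →
    pvPairsA (pvExpand ((v, m) :: rest)) = pvGreedyGo v m rest := by
  intro v m rest
  induction v, m, rest using pvGreedyGo.induct with
  | case1 v m =>
    intro _ _
    have hexp : pvExpand [(v, m)] = List.replicate m v ++ [] := by simp [pvExpand]
    rw [hexp, pvPairsA_replicate, pvGreedyGo]
    have h2 : m % 2 = 0 ∨ m % 2 = 1 := by omega
    rcases h2 with h2 | h2 <;> rw [h2] <;> simp [pvPairsA]
  | case2 v m w k rest' ih1 ih2 =>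
    intro hch hpos
    have hexp : pvExpand ((v, m) :: (w, k) :: rest')
        = List.replicate m v ++ pvExpand ((w, k) :: rest') := by
      simp [pvExpand]
    rw [hexp, pvPairsA_replicate, pvGreedyGo]
    have hk : 0 < k := hpos (w, k) List.mem_cons_self
    have hwv : w < v := (List.isChain_cons_cons.mp hch).1
    have hch2 : List.IsChain pvLt ((w, k) :: rest') := (List.isChain_cons_cons.mp hch).2
    have hpos2 : ∀ p ∈ rest', 0 < p.2 := fun p hp => hpos p (List.mem_cons_of_mem _ hp)
    by_cases ho : m % 2 = 1
    · rw [if_pos ho, ho]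
      have hexp2 : pvExpand ((w, k) :: rest')
          = w :: (List.replicate (k - 1) w ++ pvExpand rest') := by
        obtain ⟨k', rfl⟩ : ∃ k', k = k' + 1 := ⟨k - 1, by omega⟩
        simp [pvExpand, List.replicate_succ]
      rw [hexp2]
      have hcons : List.replicate 1 v ++ (w :: (List.replicate (k - 1) w ++ pvExpand rest'))
          = v :: w :: (List.replicate (k - 1) w ++ pvExpand rest') := rfl
      rw [hcons]
      have hvw : ¬ v = w := by omega
      by_cases hw : w = v - 1
      · have hv1 : v - 1 = w := hw.symm
        rw [pvPairsA, if_neg hvw, if_pos hv1, if_pos ⟨hw, hk⟩]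
        have hback : List.replicate (k - 1) w ++ pvExpand rest' = pvExpand ((w, k - 1) :: rest') := by
          simp [pvExpand]
        rw [hback, ih1 (pvChainCount w k (k - 1) rest' hch2) hpos2, hv1]
      · have hv1 : ¬ v - 1 = w := fun hh => hw hh.symm
        rw [pvPairsA, if_neg hvw, if_neg hv1, if_neg (fun hh => hw hh.1)]
        rw [hexp2.symm, ih2 hch2 hpos2]
    · have ho0 : m % 2 = 0 := by omega
      rw [if_neg ho, ho0]
      simp only [List.replicate_zero, List.nil_append]
      rw [ih2 hch2 hpos2]

-- B's loop over the distinct values emits exactly the greedy sides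
theorem pvSidesB_go : ∀ (v : Int) (m : Nat) (rest : List (Int × Nat)),
    List.IsChain pvLt ((v, m) :: rest) →
    (∀ p ∈ rest, 0 < p.2) →
    ∀ (cnt : PySem.Dict Int Int),
    (∀ w' : Int, w' ≤ v → cnt.getD w' 0 = pvLookup ((v, m) :: rest) w') →
    pvSidesB (v :: rest.map Prod.fst) cnt = pvGreedyGo v m rest := by
  intro v m rest
  induction v, m, rest using pvGreedyGo.induct with
  | case1 v m =>
    intro _ _ cnt hinv
    have hv : cnt.getD v 0 = (m : Int) := by
      have h := hinv v le_rfl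
      rwa [pvLookup, if_pos rfl] at h
    have hfd : (PySem.Int.floordiv ((m : Nat) : Int) 2).toNat = m / 2 := by
      have h := PySem.Int.floordiv_natCast m 2
      rw [show ((2 : Nat) : Int) = (2 : Int) by norm_num] at h
      rw [h, Int.toNat_natCast]
    have hg : ¬ (PySem.Int.mod (cnt.getD v 0) 2 = 1 ∧ 0 < cnt.getD (v - 1) 0) := by
      rintro ⟨-, hlt⟩
      have h := hinv (v - 1) (by omega)
      rw [pvLookup, if_neg (by omega), pvLookup] at h
      rw [h] at hlt
      exact lt_irrefl 0 hlt
    simp only [List.map_nil]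
    rw [pvSidesB, if_neg hg, hv, hfd, pvGreedyGo, pvSidesB, List.append_nil]
  | case2 v m w k rest' ih1 ih2 =>
    intro hch hpos cnt hinv
    have hv : cnt.getD v 0 = (m : Int) := by
      have h := hinv v le_rfl
      rwa [pvLookup, if_pos rfl] at h
    have hfd : (PySem.Int.floordiv ((m : Nat) : Int) 2).toNat = m / 2 := by
      have h := PySem.Int.floordiv_natCast m 2
      rw [show ((2 : Nat) : Int) = (2 : Int) by norm_num] at h
      rw [h, Int.toNat_natCast]
    have hmd : PySem.Int.mod ((m : Nat) : Int) 2 = ((m % 2 : Nat) : Int) := by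
      have h := PySem.Int.mod_natCast m 2
      rwa [show ((2 : Nat) : Int) = (2 : Int) by norm_num] at h
    have hmodiff : (PySem.Int.mod (cnt.getD v 0) 2 = 1) ↔ m % 2 = 1 := by
      rw [hv, hmd]; omega
    have hk : 0 < k := hpos (w, k) List.mem_cons_self
    have hwv : w < v := (List.isChain_cons_cons.mp hch).1
    have hch2 : List.IsChain pvLt ((w, k) :: rest') := (List.isChain_cons_cons.mp hch).2
    have hpos2 : ∀ p ∈ rest', 0 < p.2 := fun p hp => hpos p (List.mem_cons_of_mem _ hp)
    have hrest'lt : ∀ p ∈ rest', p.1 < w := by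
      haveI : Trans pvLt pvLt pvLt := ⟨fun h1 h2 => lt_trans h2 h1⟩
      have hpw := hch2.pairwise
      exact fun p hp => (List.pairwise_cons.mp hpw).1 p hp
    have hv1 : cnt.getD (v - 1) 0 = pvLookup ((w, k) :: rest') (v - 1) := by
      have h := hinv (v - 1) (by omega)
      rwa [pvLookup, if_neg (by omega)] at h
    have hlook : pvLookup ((w, k) :: rest') (v - 1) = if v - 1 = w then (k : Int) else 0 := by
      by_cases hw : v - 1 = w
      · rw [pvLookup, if_pos hw, if_pos hw]
      · rw [pvLookup, if_neg hw, if_neg hw]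
        exact pvLookup_eq_zero rest' (v - 1) (fun p hp => by
          have := hrest'lt p hp
          omega)
    have hinv2 : ∀ w' : Int, w' ≤ w → cnt.getD w' 0 = pvLookup ((w, k) :: rest') w' := by
      intro w' hle
      have h := hinv w' (by omega)
      rwa [pvLookup, if_neg (by omega)] at h
    rw [pvSidesB, pvGreedyGo, List.map_cons]
    by_cases ho : m % 2 = 1
    · by_cases hw : v - 1 = w
      · -- mixed pair: borrow one stick of length v-1
        have hg : PySem.Int.mod (cnt.getD v 0) 2 = 1 ∧ 0 < cnt.getD (v - 1) 0 := by
          refine ⟨hmodiff.mpr ho, ?_⟩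
          rw [hv1, hlook, if_pos hw]
          exact_mod_cast hk
        rw [if_pos hg, hv, hfd, if_pos ho, if_pos ⟨hw.symm, hk⟩]
        have hcnt : cnt.insert (v - 1) (cnt.getD (v - 1) 0 - 1)
            = cnt.insert w ((k - 1 : Nat) : Int) := by
          rw [hv1, hlook, if_pos hw, hw]
          congr 1
          omega
        rw [hcnt, hw]
        congr 2
        refine ih1 (pvChainCount w k (k - 1) rest' hch2) hpos2 _ ?_
        intro w' hle
        rw [PySem.Dict.getD_insert]
        by_cases hww : w' = w
        · rw [if_pos hww, pvLookup, if_pos hww]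
        · rw [if_neg hww, hinv2 w' hle]
          simp only [pvLookup]
          rw [if_neg hww, if_neg hww]
      · -- odd leftover but no sticks of length v-1
        have hg : ¬ (PySem.Int.mod (cnt.getD v 0) 2 = 1 ∧ 0 < cnt.getD (v - 1) 0) := by
          rintro ⟨-, hlt⟩
          rw [hv1, hlook, if_neg hw] at hlt
          exact lt_irrefl 0 hlt
        rw [if_neg hg, hv, hfd, if_pos ho, if_neg (fun hh => hw hh.1.symm)]
        congr 1
        exact ih2 hch2 hpos2 cnt hinv2
    · have hg : ¬ (PySem.Int.mod (cnt.getD v 0) 2 = 1 ∧ 0 < cnt.getD (v - 1) 0) :=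
        fun hcon => ho (hmodiff.mp hcon.1)
      rw [if_neg hg, hv, hfd, if_neg ho]
      congr 1
      exact ih2 hch2 hpos2 cnt hinv2

-- rle facts
theorem pvRle_expand (s : List Int) : pvExpand (pvRle s) = s := by
  induction s with
  | nil => rfl
  | cons x xs ih =>
    rw [pvRle]
    cases h : pvRle xs with
    | nil =>
      rw [pvRleCons, pvExpand]
      simp only [List.flatMap_cons, List.flatMap_nil, List.replicate_one, List.append_nil]
      rw [← ih, h]
      rfl
    | cons p rest =>
      obtain ⟨v, m⟩ := p
      rw [pvRleCons]
      by_cases hx : x = v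
      · subst hx
        rw [if_pos rfl, ← ih, h]
        simp [pvExpand, List.replicate_succ]
      · rw [if_neg hx, ← ih, h]
        simp [pvExpand]

theorem pvRle_head (x : Int) (xs : List Int) : ∃ m r, pvRle (x :: xs) = (x, m + 1) :: r := by
  rw [pvRle]
  cases pvRle xs with
  | nil => exact ⟨0, [], rfl⟩
  | cons p rest =>
    obtain ⟨v, m⟩ := p
    rw [pvRleCons]
    by_cases hx : x = v
    · exact ⟨m, rest, by rw [if_pos hx]⟩
    · exact ⟨0, (v, m) :: rest, by rw [if_neg hx]⟩

theorem pvRle_pos (s : List Int) : ∀ p ∈ pvRle s, 0 < p.2 := by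
  induction s with
  | nil => intro p hp; cases hp
  | cons x xs ih =>
    intro p hp
    rw [pvRle] at hp
    cases h : pvRle xs with
    | nil =>
      rw [h, pvRleCons] at hp
      simp at hp
      subst hp; simp
    | cons q rest =>
      obtain ⟨v, m⟩ := q
      rw [h, pvRleCons] at hp
      by_cases hx : x = v
      · rw [if_pos hx] at hp
        rcases List.mem_cons.mp hp with h1 | h1
        · subst h1; simp
        · exact ih p (h ▸ List.mem_cons_of_mem _ h1)
      · rw [if_neg hx] at hp
        rcases List.mem_cons.mp hp with h1 | h1
        · subst h1; simp
        · exact ih p (h ▸ h1)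

theorem pvRle_chain (s : List Int) (hpw : List.Pairwise (fun a b : Int => b ≤ a) s) :
    List.IsChain pvLt (pvRle s) := by
  induction s with
  | nil => exact List.IsChain.nil
  | cons x xs ih =>
    have hle : ∀ y ∈ xs, y ≤ x := (List.pairwise_cons.mp hpw).1
    have ihx := ih (List.pairwise_cons.mp hpw).2
    cases xs with
    | nil => exact List.isChain_singleton _
    | cons y ys =>
      obtain ⟨m, r, hr⟩ := pvRle_head y ys
      rw [pvRle, hr, pvRleCons]
      rw [hr] at ihx
      by_cases hx : x = y
      · rw [if_pos hx]
        subst hx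
        exact pvChainCount x (m + 1) (m + 1 + 1) r ihx
      · rw [if_neg hx]
        rw [List.isChain_cons_cons]
        refine ⟨?_, ihx⟩
        have := hle y List.mem_cons_self
        show y < x
        omega

theorem pvMem_expand (e : List (Int × Nat)) (hpos : ∀ p ∈ e, 0 < p.2) (x : Int) :
    x ∈ pvExpand e ↔ x ∈ e.map Prod.fst := by
  rw [pvExpand]
  simp only [List.mem_flatMap, List.mem_map, List.mem_replicate]
  constructor
  · rintro ⟨p, hp, -, rfl⟩; exact ⟨p, hp, rfl⟩
  · rintro ⟨p, hp, rfl⟩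
    exact ⟨p, hp, by have := hpos p hp; omega, rfl⟩

theorem pvLookup_count (e : List (Int × Nat)) (hnd : (e.map Prod.fst).Nodup) (w : Int) :
    pvLookup e w = ((pvExpand e).count w : Int) := by
  induction e with
  | nil => rfl
  | cons p rest ih =>
    obtain ⟨v, m⟩ := p
    have hexp : pvExpand ((v, m) :: rest) = List.replicate m v ++ pvExpand rest := by
      simp [pvExpand]
    rw [hexp, List.count_append]
    rw [List.map_cons, List.nodup_cons] at hnd
    by_cases hw : w = v
    · subst hw
      have hz : (pvExpand rest).count w = 0 := by
        rw [List.count_eq_zero]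
        intro hmem
        rw [pvExpand] at hmem
        simp only [List.mem_flatMap, List.mem_replicate] at hmem
        obtain ⟨p, hp, -, rfl⟩ := hmem
        exact hnd.1 (List.mem_map.mpr ⟨p, hp, rfl⟩)
      rw [pvLookup, if_pos rfl, hz]
      simp
    · rw [pvLookup, if_neg hw, ih hnd.2]
      simp only [List.count_replicate]
      have hvw : ¬ (v == w) = true := by simpa using fun h => hw h.symm
      rw [if_neg hvw, Nat.zero_add]

-- ===== VERDICT (by name: the statement is the Claim_ definition above) =====
theorem max_rect_area_spec : Claim_equal_max_rect_area := by
  intro arr _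
  unfold Spec_max_rect_area max_rect_area max_rect_area_alt
  simp only [PySem.Dict.foldl_insert_getD_add_one_eq_counter, PySem.Dict.keys_counter]
  set s := PySem.List.sorted arr (fun x => x) true with hs
  have hpw : List.Pairwise (fun a b : Int => b ≤ a) s :=
    PySem.List.sorted_pairwise_rev arr (fun x => x)
  have hch := pvRle_chain s hpw
  have hpos := pvRle_pos s
  have hpairs : List.Pairwise (fun a b : Int => b < a) ((pvRle s).map Prod.fst) := by
    haveI : Trans pvLt pvLt pvLt := ⟨fun h1 h2 => lt_trans h2 h1⟩
    exact List.pairwise_map.mpr hch.pairwise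
  have hnd : ((pvRle s).map Prod.fst).Nodup := hpairs.imp ne_of_gt
  have hperm : ((pvRle s).map Prod.fst).Perm (PySem.Set.ofList s) := by
    apply List.perm_of_nodup_nodup_toFinset_eq hnd (PySem.Set.nodup_ofList s)
    ext x
    simp only [List.mem_toFinset]
    rw [PySem.Set.mem_ofList, ← pvMem_expand (pvRle s) hpos x, pvRle_expand]
  have hsortkeys : PySem.List.sorted (PySem.Set.ofList s) (fun x => x) true
      = (pvRle s).map Prod.fst :=
    PySem.List.sorted_rev_eq_of_perm_of_pairwise_gt _ _ _ hperm hpairs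
  rw [hsortkeys, pvLoopB_eq_area]
  cases hrle : pvRle s with
  | nil =>
    have hsnil : s = [] := by rw [← pvRle_expand s, hrle]; rfl
    rw [hsnil]
    rfl
  | cons p rest =>
    obtain ⟨v, m⟩ := p
    have hinv : ∀ w' : Int, w' ≤ v →
        (PySem.Dict.counter s).getD w' 0 = pvLookup ((v, m) :: rest) w' := by
      intro w' _
      rw [PySem.Dict.getD_counter, ← hrle, pvLookup_count (pvRle s) hnd w', pvRle_expand]
    rw [hrle] at hch hpos
    rw [List.map_cons, pvSidesB_go v m rest hch (fun p hp => hpos p (List.mem_cons_of_mem _ hp))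
      (PySem.Dict.counter s) hinv]
    rw [← pvPairsA_go v m rest hch (fun p hp => hpos p (List.mem_cons_of_mem _ hp)), ← hrle,
      pvRle_expand]
    rfl
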